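-- pv_equiv track=rewrite | github.com/yeonddori/Algorithm-Study | tbvjgjfzm/2024-03/PGS_LV1_피자-나눠-먹기.py | solution
-- ===== SOURCE A (Python) =====
-- def solution(n):
--     if ((n >= 1) and (n<= 100)):
--         if (n % 6) == 0:
--             answer = (n // 6)
--         else:
--             for i in range(1, 100):
--                 if ((i * 6) % n) == 0:
--                     break
--             answer = i
--     return answer
-- ===== SOURCE B (Python) =====
-- def solution(n):
--     # Closed form: smallest i with 6i % n == 0 is n // gcd(6, n);
--     # gcd(6, n) computed by a divisor ladder instead of A's linear search.
--     if 1 <= n <= 100: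
--         if n % 6 == 0:
--             g = 6
--         elif n % 3 == 0:
--             g = 3
--         elif n % 2 == 0:
--             g = 2
--         else:
--             g = 1
--         answer = n // g
--     return answer
-- ===== Notes on version B (the rewrite author's own statement) =====
-- stated objective: simpler
-- what changed: Replaces A's linear search for the smallest i with 6i divisible by n by the closed form n // gcd(6,n), with gcd(6,n) read off a three-branch divisor ladder; same guard, so out-of-range n still raises UnboundLocalError.
import Mathlib
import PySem

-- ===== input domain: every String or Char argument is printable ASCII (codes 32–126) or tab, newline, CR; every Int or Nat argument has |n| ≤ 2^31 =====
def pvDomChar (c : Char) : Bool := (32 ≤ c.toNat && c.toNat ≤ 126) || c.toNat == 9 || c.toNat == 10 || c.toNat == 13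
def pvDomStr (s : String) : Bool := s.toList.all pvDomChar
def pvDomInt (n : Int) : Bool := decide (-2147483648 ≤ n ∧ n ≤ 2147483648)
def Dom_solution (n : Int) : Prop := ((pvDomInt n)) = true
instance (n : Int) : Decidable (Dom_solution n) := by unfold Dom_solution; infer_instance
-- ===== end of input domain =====

-- B replaces A's linear search by the closed form n // gcd(6,n) (gcd via a divisor ladder): simpler, same guard and same UnboundLocalError outside 1..100 (excluded by Pre_).


-- ===== PORT A =====
-- A's 'for i in range(1,100): if (i*6)%n==0: break' — recursion over the range
-- list carrying the last value of i (Python's i keeps its value after the loop).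
def solutionLoopA (n : Int) : List Int → Int → Int
  | [], i => i
  | j :: rest, _ => if PySem.Int.mod (j * 6) n = 0 then j else solutionLoopA n rest j

def solution (n : Int) : Int :=
  if 1 ≤ n ∧ n ≤ 100 then
    if PySem.Int.mod n 6 = 0 then PySem.Int.floordiv n 6
    else solutionLoopA n (PySem.List.pyRange 1 100 1) 0
  else 0  -- Python raises UnboundLocalError here; excluded by Pre_solution

-- ===== PORT B =====
def solution_alt (n : Int) : Int :=
  if 1 ≤ n ∧ n ≤ 100 then
    let g : Int :=
      if PySem.Int.mod n 6 = 0 then 6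
      else if PySem.Int.mod n 3 = 0 then 3
      else if PySem.Int.mod n 2 = 0 then 2
      else 1
    PySem.Int.floordiv n g
  else 0  -- Python raises UnboundLocalError here; excluded by Pre_solution

-- ===== PRECONDITION & SPEC =====
-- Pre_ excludes n outside [1,100], where A raises UnboundLocalError.
def Pre_solution (n : Int) : Prop := 1 ≤ n ∧ n ≤ 100
instance (n : Int) : Decidable (Pre_solution n) := by unfold Pre_solution; infer_instance
def pvWitness_solution : Int := (7)

def Spec_solution (n : Int) (out : Int) : Prop := out = solution_alt n
instance (n : Int) (out : Int) : Decidable (Spec_solution n out) := by unfold Spec_solution; infer_instance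

-- ===== CLAIM (what is proved, stated in full; the proofs are below) =====
def Claim_equal_solution : Prop := ∀ (n : Int), Dom_solution n → Pre_solution n → Spec_solution n (solution n)

-- ===== LEMMAS AND PROOFS =====

-- ===== VERDICT (by name: the statement is the Claim_ definition above) =====
theorem solution_spec : Claim_equal_solution := by
  intro n _ hp
  unfold Spec_solution
  obtain ⟨h1, h2⟩ := hp
  interval_cases n <;> decide
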